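-- pv_equiv track=rewrite | github.com/Ganeshpithani/infosys-springboard-internship | main.py | extract_recipe_details
-- ===== SOURCE A (Python) =====
-- def extract_recipe_details(recipe_text):
--     """Extract structured data from generated recipe text."""
--     lines = recipe_text.split('\n')
--     recipe_details = {
--         "name": "",
--         "cooking_time": "",
--         "cuisine": "",
--         "nutritional_info": "",
--         "instructions": ""
--     }
--     current_section = None
--     nutritional_info_lines = []
--     instructions_lines = []
--
--     for line in lines:
--         line = line.strip()
--         if not line:
--             continue
--
--         if line.startswith("**Recipe Name:**"):
--             # Extract only the recipe name part
--             recipe_details["name"] = line.split(" ")[-1].strip()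
--             current_section = None
--         elif line.startswith("**Cooking Time:**"):
--             recipe_details["cooking_time"] = line.split("**Cooking Time:**")[-1].strip()
--             current_section = None
--         elif line.startswith("**Cuisine:**"):
--             recipe_details["cuisine"] = line.split("**Cuisine:**")[-1].strip()
--             current_section = None
--         elif line.startswith("**Nutritional Information:**"):
--             current_section = "nutritional_info"
--         elif line.startswith("**Instructions:**"):
--             current_section = "instructions"
--         elif current_section == "nutritional_info":
--             nutritional_info_lines.append(line)
--         elif current_section == "instructions":
--             instructions_lines.append(line)
--
--     recipe_details["nutritional_info"] = " ".join(nutritional_info_lines).strip()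
--     recipe_details["instructions"] = "\n".join(instructions_lines).strip()
--
--     return recipe_details
-- ===== SOURCE B (Python) =====
-- def _classify(line):
--     if line.startswith("**Recipe Name:**"):
--         return "name"
--     if line.startswith("**Cooking Time:**"):
--         return "time"
--     if line.startswith("**Cuisine:**"):
--         return "cuisine"
--     if line.startswith("**Nutritional Information:**"):
--         return "nut"
--     if line.startswith("**Instructions:**"):
--         return "ins"
--     return None
--
--
-- def extract_recipe_details(recipe_text):
--     """Two-pass variant: pre-filter stripped non-empty lines, classify headers,
--     then slice out each section's block(s)."""
--     lines = [s for s in (l.strip() for l in recipe_text.split('\n')) if s]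
--
--     name = time = cuisine = ""
--     for l in lines:
--         k = _classify(l)
--         if k == "name":
--             name = l.split(" ")[-1].strip()
--         elif k == "time":
--             time = l.split("**Cooking Time:**")[-1].strip()
--         elif k == "cuisine":
--             cuisine = l.split("**Cuisine:**")[-1].strip()
--
--     def block(tag):
--         out = []
--         i, n = 0, len(lines)
--         while i < n:
--             if _classify(lines[i]) == tag:
--                 i += 1
--                 while i < n and _classify(lines[i]) is None:
--                     out.append(lines[i])
--                     i += 1
--             else:
--                 i += 1
--         return out
--
--     return {
--         "name": name,
--         "cooking_time": time,
--         "cuisine": cuisine,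
--         "nutritional_info": " ".join(block("nut")).strip(),
--         "instructions": "\n".join(block("ins")).strip(),
--     }
-- ===== Notes on version B (the rewrite author's own statement) =====
-- stated objective: alternative
-- what changed: Replaces A's single current_section state-machine loop with a two-pass structure: pre-filter the stripped non-empty lines, extract the three scalar fields with a classifier in one pass, then slice each section's blocks out of the line list (collecting up to the next recognized header, appending across repeated headers).
import Mathlib
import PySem

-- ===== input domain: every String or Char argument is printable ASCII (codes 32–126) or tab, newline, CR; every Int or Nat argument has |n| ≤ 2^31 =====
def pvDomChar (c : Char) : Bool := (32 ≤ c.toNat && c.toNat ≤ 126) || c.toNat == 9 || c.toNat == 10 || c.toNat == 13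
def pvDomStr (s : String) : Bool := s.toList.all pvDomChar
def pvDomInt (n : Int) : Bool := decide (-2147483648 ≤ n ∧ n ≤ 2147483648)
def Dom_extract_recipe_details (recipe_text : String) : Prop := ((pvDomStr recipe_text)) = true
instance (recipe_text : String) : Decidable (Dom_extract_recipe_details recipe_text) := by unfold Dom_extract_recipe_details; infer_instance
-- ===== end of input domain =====

-- B parses in two passes (pre-filter stripped non-empty lines, classify headers, slice out
-- section blocks) instead of A's single current_section state-machine loop; objective:
-- alternative decomposition, same cost.


-- ===== PORT A =====
-- loop body after the `if not line: continue` guard (line is the stripped line);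
-- state = (name, cooking_time, cuisine, current_section, nutritional_info_lines, instructions_lines).
-- `line.split(sep)[-1]` is ported as `((split? line sep).getD []).getLastD ""`: sep is a
-- non-empty literal so split? is always `some` of a non-empty list, and [-1] is its last element.
def pvA_body (s : String × String × String × Option String × List String × List String)
    (line : String) : String × String × String × Option String × List String × List String :=
  if PySem.Str.startswith line "**Recipe Name:**" then
    (PySem.Str.strip (((PySem.Str.split? line " ").getD []).getLastD ""), s.2.1, s.2.2.1, none, s.2.2.2.2.1, s.2.2.2.2.2)
  else if PySem.Str.startswith line "**Cooking Time:**" then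
    (s.1, PySem.Str.strip (((PySem.Str.split? line "**Cooking Time:**").getD []).getLastD ""), s.2.2.1, none, s.2.2.2.2.1, s.2.2.2.2.2)
  else if PySem.Str.startswith line "**Cuisine:**" then
    (s.1, s.2.1, PySem.Str.strip (((PySem.Str.split? line "**Cuisine:**").getD []).getLastD ""), none, s.2.2.2.2.1, s.2.2.2.2.2)
  else if PySem.Str.startswith line "**Nutritional Information:**" then
    (s.1, s.2.1, s.2.2.1, some "nutritional_info", s.2.2.2.2.1, s.2.2.2.2.2)
  else if PySem.Str.startswith line "**Instructions:**" then
    (s.1, s.2.1, s.2.2.1, some "instructions", s.2.2.2.2.1, s.2.2.2.2.2)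
  else if s.2.2.2.1 == some "nutritional_info" then
    (s.1, s.2.1, s.2.2.1, s.2.2.2.1, s.2.2.2.2.1 ++ [line], s.2.2.2.2.2)
  else if s.2.2.2.1 == some "instructions" then
    (s.1, s.2.1, s.2.2.1, s.2.2.2.1, s.2.2.2.2.1, s.2.2.2.2.2 ++ [line])
  else
    s

-- one iteration of A's loop: strip, skip empty ('continue'), then the body above
def pvA_step (s : String × String × String × Option String × List String × List String)
    (raw : String) : String × String × String × Option String × List String × List String :=
  if PySem.Str.strip raw == "" then s else pvA_body s (PySem.Str.strip raw)

-- the loop over recipe_text.split('\n') from the initial state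
def pvA_run (recipe_text : String) : String × String × String × Option String × List String × List String :=
  ((PySem.Str.split? recipe_text "\n").getD []).foldl pvA_step ("", "", "", none, [], [])

def extract_recipe_details (recipe_text : String) : List (String × String) :=
  [("name", (pvA_run recipe_text).1),
   ("cooking_time", (pvA_run recipe_text).2.1),
   ("cuisine", (pvA_run recipe_text).2.2.1),
   ("nutritional_info", PySem.Str.strip (PySem.Str.join " " (pvA_run recipe_text).2.2.2.2.1)),
   ("instructions", PySem.Str.strip (PySem.Str.join "\n" (pvA_run recipe_text).2.2.2.2.2))]

-- ===== PORT B =====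
inductive PvKind : Type
  | name | time | cuisine | nut | ins
deriving DecidableEq, Repr

-- Source B's _classify
def pvClassify (line : String) : Option PvKind :=
  if PySem.Str.startswith line "**Recipe Name:**" then some .name
  else if PySem.Str.startswith line "**Cooking Time:**" then some .time
  else if PySem.Str.startswith line "**Cuisine:**" then some .cuisine
  else if PySem.Str.startswith line "**Nutritional Information:**" then some .nut
  else if PySem.Str.startswith line "**Instructions:**" then some .ins
  else none

-- Source B's pre-filtered list of stripped non-empty lines
def pvB_lines (recipe_text : String) : List String :=
  (((PySem.Str.split? recipe_text "\n").getD []).map PySem.Str.strip).filter (fun s => !(s == ""))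

-- Source B's scalar-field loop body
def pvB_scalar (acc : String × String × String) (l : String) : String × String × String :=
  match pvClassify l with
  | some .name => (PySem.Str.strip (((PySem.Str.split? l " ").getD []).getLastD ""), acc.2.1, acc.2.2)
  | some .time => (acc.1, PySem.Str.strip (((PySem.Str.split? l "**Cooking Time:**").getD []).getLastD ""), acc.2.2)
  | some .cuisine => (acc.1, acc.2.1, PySem.Str.strip (((PySem.Str.split? l "**Cuisine:**").getD []).getLastD ""))
  | _ => acc

-- Source B's inner while: consume non-header lines; returns (consumed block, remaining lines)
def pvCollect : List String → List String × List String
  | [] => ([], [])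
  | l :: rest =>
    if pvClassify l ≠ none then ([], l :: rest)
    else ((l :: (pvCollect rest).1), (pvCollect rest).2)

-- needed by pvBlock's decreasing_by
lemma pvCollect_snd_length (ls : List String) : (pvCollect ls).2.length ≤ ls.length := by
  induction ls with
  | nil => simp [pvCollect]
  | cons l rest ih =>
    simp only [pvCollect]
    split
    · simp
    · simpa using Nat.le_succ_of_le ih

-- Source B's outer while for one tag ('block')
def pvBlock (tag : PvKind) : List String → List String
  | [] => []
  | l :: rest =>
    if pvClassify l = some tag then
      (pvCollect rest).1 ++ pvBlock tag (pvCollect rest).2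
    else pvBlock tag rest
termination_by ls => ls.length
decreasing_by
  · have := pvCollect_snd_length rest; simp; omega
  · simp

def extract_recipe_details_alt (recipe_text : String) : List (String × String) :=
  [("name", ((pvB_lines recipe_text).foldl pvB_scalar ("", "", "")).1),
   ("cooking_time", ((pvB_lines recipe_text).foldl pvB_scalar ("", "", "")).2.1),
   ("cuisine", ((pvB_lines recipe_text).foldl pvB_scalar ("", "", "")).2.2),
   ("nutritional_info", PySem.Str.strip (PySem.Str.join " " (pvBlock .nut (pvB_lines recipe_text)))),
   ("instructions", PySem.Str.strip (PySem.Str.join "\n" (pvBlock .ins (pvB_lines recipe_text))))]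

-- ===== PRECONDITION & SPEC =====
def Spec_extract_recipe_details (recipe_text : String) (out : List (String × String)) : Prop := out = extract_recipe_details_alt recipe_text
instance (recipe_text : String) (out : List (String × String)) : Decidable (Spec_extract_recipe_details recipe_text out) := by unfold Spec_extract_recipe_details; infer_instance

-- ===== CLAIM (what is proved, stated in full; the proofs are below) =====
def Claim_equal_extract_recipe_details : Prop := ∀ (recipe_text : String), Dom_extract_recipe_details recipe_text → Spec_extract_recipe_details recipe_text (extract_recipe_details recipe_text)

-- ===== LEMMAS AND PROOFS =====

-- A's fold over the raw lines equals the guard-free body folded over the stripped non-empty lines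
lemma pvA_filter (ls : List String)
    (s : String × String × String × Option String × List String × List String) :
    ls.foldl pvA_step s = ((ls.map PySem.Str.strip).filter (fun x => !(x == ""))).foldl pvA_body s := by
  induction ls generalizing s with
  | nil => rfl
  | cons l rest ih =>
    simp only [List.foldl_cons, List.map_cons, List.filter_cons]
    by_cases h : (PySem.Str.strip l == "") = true
    · rw [show pvA_step s l = s from if_pos h, ih, if_neg (by simp [h])]
    · rw [show pvA_step s l = pvA_body s (PySem.Str.strip l) from if_neg h, ih,
        if_pos (by simp [h]), List.foldl_cons]

-- section tracker: A's current_section after the (stripped, non-empty) lines L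
def pvSect (sect : Option String) : List String → Option String
  | [] => sect
  | l :: ls =>
    match pvClassify l with
    | none => pvSect sect ls
    | some .nut => pvSect (some "nutritional_info") ls
    | some .ins => pvSect (some "instructions") ls
    | some _ => pvSect none ls

-- the lines A appends to section `tag`, given whether we start inside that section
def pvSim (tag : PvKind) (inS : Bool) : List String → List String
  | [] => []
  | l :: ls =>
    match pvClassify l with
    | none => if inS then l :: pvSim tag true ls else pvSim tag false ls
    | some k => pvSim tag (k == tag) ls

-- A's if/elif chain, re-expressed through B's classifier (the same conditions in the same order)
lemma pvA_body_classify (s : String × String × String × Option String × List String × List String)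
    (l : String) :
    pvA_body s l =
      match pvClassify l with
      | some .name => (PySem.Str.strip (((PySem.Str.split? l " ").getD []).getLastD ""), s.2.1, s.2.2.1, none, s.2.2.2.2.1, s.2.2.2.2.2)
      | some .time => (s.1, PySem.Str.strip (((PySem.Str.split? l "**Cooking Time:**").getD []).getLastD ""), s.2.2.1, none, s.2.2.2.2.1, s.2.2.2.2.2)
      | some .cuisine => (s.1, s.2.1, PySem.Str.strip (((PySem.Str.split? l "**Cuisine:**").getD []).getLastD ""), none, s.2.2.2.2.1, s.2.2.2.2.2)
      | some .nut => (s.1, s.2.1, s.2.2.1, some "nutritional_info", s.2.2.2.2.1, s.2.2.2.2.2)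
      | some .ins => (s.1, s.2.1, s.2.2.1, some "instructions", s.2.2.2.2.1, s.2.2.2.2.2)
      | none =>
        if s.2.2.2.1 == some "nutritional_info" then
          (s.1, s.2.1, s.2.2.1, s.2.2.2.1, s.2.2.2.2.1 ++ [l], s.2.2.2.2.2)
        else if s.2.2.2.1 == some "instructions" then
          (s.1, s.2.1, s.2.2.1, s.2.2.2.1, s.2.2.2.2.1, s.2.2.2.2.2 ++ [l])
        else s := by
  simp only [pvA_body, pvClassify]
  split_ifs <;> rfl

-- characterization of A's loop in terms of B's scalar fold and pvSim
lemma pvA_char (L : List String) (n c u : String) (sect : Option String) (nl il : List String) :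
    L.foldl pvA_body (n, c, u, sect, nl, il) =
      ((L.foldl pvB_scalar (n, c, u)).1,
       (L.foldl pvB_scalar (n, c, u)).2.1,
       (L.foldl pvB_scalar (n, c, u)).2.2,
       pvSect sect L,
       nl ++ pvSim .nut (sect == some "nutritional_info") L,
       il ++ pvSim .ins (sect == some "instructions") L) := by
  induction L generalizing n c u sect nl il with
  | nil => simp [pvSect, pvSim]
  | cons l ls ih =>
    simp only [List.foldl_cons, pvA_body_classify]
    cases hc : pvClassify l with
    | some k =>
      cases k <;>
        · simp only [pvB_scalar, pvSect, pvSim, hc]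
          rw [ih]
          simp
          try (constructor <;> rfl)
          try rfl
    | none =>
      simp only [pvB_scalar, pvSect, pvSim, hc]
      by_cases h6 : sect = some "nutritional_info"
      · subst h6
        rw [if_pos (by simp), ih]
        simp
      · by_cases h7 : sect = some "instructions"
        · subst h7
          rw [if_neg (by simp), if_pos (by simp), ih]
          simp
        · rw [if_neg (by simp [h6]), if_neg (by simp [h7]), ih]
          have hsn : (sect == some "nutritional_info") = false := by simp [h6]
          have hsi : (sect == some "instructions") = false := by simp [h7]
          simp [hsn, hsi]

-- pvSim agrees with Source B's block slicing
lemma pvSim_block (L : List String) (tag : PvKind) :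
    pvSim tag false L = pvBlock tag L ∧
    pvSim tag true L = (pvCollect L).1 ++ pvBlock tag (pvCollect L).2 := by
  induction L with
  | nil => simp [pvSim, pvBlock, pvCollect]
  | cons l ls ih =>
    cases hc : pvClassify l with
    | none =>
      constructor
      · simp [pvSim, pvBlock, hc, ih.1]
      · simp [pvSim, pvCollect, hc, ih.2]
    | some k =>
      by_cases hk : k = tag
      · subst hk
        constructor
        · simp [pvSim, pvBlock, hc, ih.2]
        · simp [pvSim, pvBlock, pvCollect, hc, ih.2]
      · have hkf : (k == tag) = false := by simp [hk]
        constructor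
        · simp [pvSim, pvBlock, hc, hk, hkf, ih.1]
        · simp [pvSim, pvBlock, pvCollect, hc, hk, hkf, ih.1]

-- ===== VERDICT (by name: the statement is the Claim_ definition above) =====
theorem extract_recipe_details_spec : Claim_equal_extract_recipe_details := by
  intro r _
  unfold Spec_extract_recipe_details extract_recipe_details extract_recipe_details_alt pvA_run
  rw [pvA_filter, pvA_char]
  simp [(pvSim_block _ _).1, pvB_lines]
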